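-- pv_equiv track=rewrite | github.com/tsangwpx/leetcode | src/p2xxx/p2463.py | minBitwiseArray
-- ===== SOURCE A (Python) =====
-- from typing import List
--
-- def minBitwiseArray(nums: List[int]) -> List[int]:
--     ans = []
--
--     for number in nums:
--         found = False
--         for k in range(1, number):
--             if (k | (k + 1)) == number:
--                 found = True
--                 ans.append(k)
--                 break
--
--         if not found:
--             ans.append(-1)
--
--     return ans
-- ===== SOURCE B (Python) =====
-- from typing import List
--
-- def _trailing_ones(m: int) -> int:
--     t = 0
--     while m % 2 == 1:
--         m //= 2
--         t += 1
--     return t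
--
-- def minBitwiseArray(nums: List[int]) -> List[int]:
--     # Per element: answer exists iff number is odd and > 1; then the smallest k
--     # with k | (k+1) == number is number minus half the lowest set bit of number+1.
--     res = []
--     for number in nums:
--         if number > 1 and number % 2 == 1:
--             t = _trailing_ones(number)
--             res.append(number - (1 << (t - 1)))
--         else:
--             res.append(-1)
--     return res
-- ===== Notes on version B (the rewrite author's own statement) =====
-- stated objective: faster
-- what changed: Replaces the per-element linear search over all k in range(1, number) by a direct bit computation: count the trailing ones of number and return number - 2^(t-1) (the smallest k with k|(k+1)==number), -1 for even or <=1 numbers.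
import Mathlib
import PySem

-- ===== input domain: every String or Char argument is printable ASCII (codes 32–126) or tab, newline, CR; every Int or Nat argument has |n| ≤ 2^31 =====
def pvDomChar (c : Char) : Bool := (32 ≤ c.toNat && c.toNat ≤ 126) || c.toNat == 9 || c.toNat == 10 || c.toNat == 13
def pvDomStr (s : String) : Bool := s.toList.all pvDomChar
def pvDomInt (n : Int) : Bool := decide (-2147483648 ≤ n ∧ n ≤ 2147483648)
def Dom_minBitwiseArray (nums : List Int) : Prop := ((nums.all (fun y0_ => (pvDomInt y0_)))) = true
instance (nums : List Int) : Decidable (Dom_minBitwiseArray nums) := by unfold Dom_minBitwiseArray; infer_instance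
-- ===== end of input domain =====

-- B replaces A's per-element linear search over range(1, number) by a direct
-- bit computation (trailing-ones count); equal output on every input.

-- ===== PORT A =====
-- inner 'for k in range(1, number): if (k | (k+1)) == number: append k; break'
-- ported as a recursive scan returning the found k, or -1 when the loop falls through
def pvLoopA (number : Int) (k : Int) : Int :=
  if k < number then
    if PySem.Int.bor k (k + 1) = number then k
    else pvLoopA number (k + 1)
  else -1
termination_by (number - k).toNat
decreasing_by omega

def minBitwiseArray (nums : List Int) : List Int :=
  nums.foldl (fun ans number => ans ++ [pvLoopA number 1]) []

-- ===== PORT B =====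
-- 'while m % 2 == 1: m //= 2; t += 1'; the '0 < m' conjunct is a termination
-- guard only: B reaches this loop only with m = number > 1, and along the loop
-- m stays ≥ 0 and the m = 0 state is rejected by 'm % 2 == 1' anyway.
def pvTrail (m : Int) (t : Nat) : Nat :=
  if h : 0 < m ∧ PySem.Int.mod m 2 = 1 then pvTrail (PySem.Int.floordiv m 2) (t + 1)
  else t
termination_by m.toNat
decreasing_by
  rcases h with ⟨h1, _⟩
  rw [PySem.Int.floordiv_eq_ediv_of_pos (by omega)]
  omega

def minBitwiseArray_alt (nums : List Int) : List Int :=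
  nums.map (fun number =>
    if number > 1 ∧ PySem.Int.mod number 2 = 1 then
      number - ((1 : Int) <<< (pvTrail number 0 - 1))
    else -1)

-- ===== PRECONDITION & SPEC =====
def Spec_minBitwiseArray (nums : List Int) (out : List Int) : Prop := out = minBitwiseArray_alt nums
instance (nums : List Int) (out : List Int) : Decidable (Spec_minBitwiseArray nums out) := by unfold Spec_minBitwiseArray; infer_instance

-- ===== CLAIM (what is proved, stated in full; the proofs are below) =====
def Claim_equal_minBitwiseArray : Prop := ∀ (nums : List Int), Dom_minBitwiseArray nums → Spec_minBitwiseArray nums (minBitwiseArray nums)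

-- ===== LEMMAS AND PROOFS =====

-- Nat-level trailing-ones counter mirroring pvTrail
def natTrail (M : Nat) : Nat :=
  if h : M % 2 = 1 then natTrail (M / 2) + 1 else 0
termination_by M
decreasing_by omega

-- bit-level or lemma: (2x+1) ||| 2y = 2(x|||y)+1
theorem lor_bit10 (x y : Nat) : (2 * x + 1) ||| (2 * y) = 2 * (x ||| y) + 1 := by
  have := Nat.lor_bit true x false y
  simpa [Nat.bit] using this

theorem lor_bit01 (x y : Nat) : (2 * x) ||| (2 * y + 1) = 2 * (x ||| y) + 1 := by
  have := Nat.lor_bit false x true y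
  simpa [Nat.bit] using this

-- (a·2^s − 1) ||| (a·2^s) = a·2^s + 2^s − 1 for odd a
theorem lor_pred_self (s : Nat) : ∀ a : Nat, a % 2 = 1 →
    (a * 2 ^ s - 1) ||| (a * 2 ^ s) = a * 2 ^ s + 2 ^ s - 1 := by
  induction s with
  | zero =>
    intro a ha
    obtain ⟨r, hr⟩ : ∃ r, a = 2 * r + 1 := ⟨a / 2, by omega⟩
    subst hr
    simpa [Nat.or_self] using lor_bit01 r r
  | succ s ih =>
    intro a ha
    have h2s : 1 ≤ 2 ^ s := Nat.one_le_two_pow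
    have hP : 1 ≤ a * 2 ^ s := Nat.mul_pos (by omega) (by omega)
    have key : a * 2 ^ (s + 1) = 2 * (a * 2 ^ s) := by ring
    have hpred : 2 * (a * 2 ^ s) - 1 = 2 * (a * 2 ^ s - 1) + 1 := by omega
    rw [key, hpred, lor_bit10, ih a ha]
    have : 2 ^ (s + 1) = 2 * 2 ^ s := by ring
    omega

-- every k ≥ 1 with k ||| (k+1) = n decomposes
theorem sol_char (k n : Nat) (hk : 1 ≤ k) (h : (k ||| (k + 1)) = n) :
    ∃ c s, c % 2 = 1 ∧ k + 1 = c * 2 ^ s ∧ (c + 1) * 2 ^ s = n + 1 := by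
  obtain ⟨s, c, hc, hdecomp⟩ := Nat.exists_eq_two_pow_mul_odd (n := k + 1) (by omega)
  have hc1 : c % 2 = 1 := Nat.odd_iff.mp hc
  have hk1 : k + 1 = c * 2 ^ s := by rw [hdecomp]; ring
  have h2s : 1 ≤ 2 ^ s := Nat.one_le_two_pow
  have hcpos : 1 ≤ c := by omega
  have hkk : k = c * 2 ^ s - 1 := by omega
  have := lor_pred_self s c hc1
  rw [← hkk, ← hk1, h] at this
  refine ⟨c, s, hc1, hk1, ?_⟩
  have hP : 1 ≤ c * 2 ^ s := Nat.mul_pos (by omega) (by omega)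
  have : c * 2 ^ s + 2 ^ s = n + 1 := by omega
  calc (c + 1) * 2 ^ s = c * 2 ^ s + 2 ^ s := by ring
    _ = n + 1 := this

theorem sol_of (c s n : Nat) (hc : c % 2 = 1) (h : (c + 1) * 2 ^ s = n + 1) :
    (c * 2 ^ s - 1) ||| (c * 2 ^ s) = n := by
  have h2s : 1 ≤ 2 ^ s := Nat.one_le_two_pow
  have hP : 1 ≤ c * 2 ^ s := Nat.mul_pos (by omega) (by omega)
  have hsum : c * 2 ^ s + 2 ^ s = n + 1 := by
    calc c * 2 ^ s + 2 ^ s = (c + 1) * 2 ^ s := by ring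
      _ = n + 1 := h
  rw [lor_pred_self s c hc]
  omega

theorem lor_succ_odd (k : Nat) (hk : 1 ≤ k) : (k ||| (k + 1)) % 2 = 1 := by
  rcases Nat.even_or_odd k with he | ho
  · obtain ⟨r, hr⟩ := he
    have : k = 2 * r := by omega
    subst this
    rw [show 2 * r + 1 = 2 * r + 1 from rfl, lor_bit01]
    omega
  · obtain ⟨r, hr⟩ := ho
    subst hr
    rw [show 2 * r + 1 + 1 = 2 * (r + 1) from by ring, lor_bit10]
    omega

theorem natTrail_spec (M : Nat) : ∃ q, q % 2 = 0 ∧ M + 1 = 2 ^ natTrail M * (q + 1) := by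
  induction M using natTrail.induct with
  | case1 M h ih =>
    obtain ⟨q, hq, hM⟩ := ih
    refine ⟨q, hq, ?_⟩
    rw [natTrail, dif_pos h, pow_succ]
    have : M + 1 = 2 * (M / 2 + 1) := by omega
    rw [this, hM]; ring
  | case2 M h =>
    refine ⟨M, by omega, ?_⟩
    rw [natTrail, dif_neg h]
    ring

theorem natTrail_pos (M : Nat) (h : M % 2 = 1) : 1 ≤ natTrail M := by
  rw [natTrail]; simp [h]

theorem pvTrail_eq_natTrail (M : Nat) : ∀ t, pvTrail (M : Int) t = natTrail M + t := by
  induction M using Nat.strong_induction_on with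
  | _ M ih =>
    intro t
    have hmod : PySem.Int.mod (M : Int) 2 = ((M % 2 : Nat) : Int) := by
      exact_mod_cast PySem.Int.mod_natCast M 2
    have hdiv : PySem.Int.floordiv (M : Int) 2 = ((M / 2 : Nat) : Int) := by
      exact_mod_cast PySem.Int.floordiv_natCast M 2
    rw [pvTrail, natTrail]
    by_cases h : M % 2 = 1
    · have hpos : 0 < (M : Int) := by omega
      rw [dif_pos ⟨hpos, by rw [hmod, h]; rfl⟩, dif_pos h, hdiv,
        ih (M / 2) (by omega) (t + 1)]
      omega
    · have hfail : ¬ (0 < (M : Int) ∧ PySem.Int.mod (M : Int) 2 = 1) := by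
        rintro ⟨-, hm⟩
        rw [hmod] at hm
        omega
      rw [dif_neg hfail, dif_neg h]
      omega

-- minimality: any solution k is ≥ n − 2^(t−1)
theorem sol_min (n t q k : Nat) (hq : q % 2 = 0) (hn : n + 1 = 2 ^ t * (q + 1))
    (ht : 1 ≤ t) (hk : 1 ≤ k) (h : (k ||| (k + 1)) = n) : n - 2 ^ (t - 1) ≤ k := by
  obtain ⟨c, s, hc, hk1, hcs⟩ := sol_char k n hk h
  obtain ⟨d, hd⟩ : ∃ d, c + 1 = 2 * d := ⟨(c + 1) / 2, by omega⟩
  have hdd : d * 2 ^ (s + 1) = 2 ^ t * (q + 1) := by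
    rw [← hn, ← hcs, hd, pow_succ]; ring
  have hst : s < t := by
    by_contra hst'
    have hst'' : t ≤ s := Nat.le_of_not_lt hst'
    have hsplit : 2 ^ (s + 1) = 2 ^ t * (2 * 2 ^ (s - t)) := by
      rw [← pow_succ', ← pow_add]
      congr 1
      omega
    have : 2 ^ t * (d * (2 * 2 ^ (s - t))) = 2 ^ t * (q + 1) := by
      rw [← hdd, hsplit]; ring
    have hcanc : d * (2 * 2 ^ (s - t)) = q + 1 :=
      Nat.eq_of_mul_eq_mul_left (Nat.pow_pos (by omega)) this
    have : q + 1 = 2 * (d * 2 ^ (s - t)) := by rw [← hcanc]; ring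
    omega
  have hsplit2 : 2 ^ t = 2 ^ (s + 1) * 2 ^ (t - s - 1) := by
    rw [← pow_add]; congr 1; omega
  have hdeq : d = 2 ^ (t - s - 1) * (q + 1) := by
    have : 2 ^ (s + 1) * d = 2 ^ (s + 1) * (2 ^ (t - s - 1) * (q + 1)) := by
      rw [mul_comm (2 ^ (s + 1)) d, hdd, hsplit2]; ring
    exact Nat.eq_of_mul_eq_mul_left (Nat.pow_pos (by omega)) this
  -- abbreviations A = 2^s, B = 2^(t-s-1)
  have hA : 1 ≤ 2 ^ s := Nat.one_le_two_pow
  have hB : 1 ≤ 2 ^ (t - s - 1) := Nat.one_le_two_pow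
  have h1 : (c + 1) * 2 ^ s = n + 1 := hcs
  have h2 : c * 2 ^ s + 2 ^ s = n + 1 := by
    calc c * 2 ^ s + 2 ^ s = (c + 1) * 2 ^ s := by ring
      _ = n + 1 := h1
  have hkA : k + 2 ^ s = n := by omega
  have htw : t - 1 = s + (t - s - 1) := by omega
  have h4 : 2 ^ (t - 1) = 2 ^ s * 2 ^ (t - s - 1) := by rw [htw, pow_add]
  have hAB : 2 ^ s ≤ 2 ^ s * 2 ^ (t - s - 1) := Nat.le_mul_of_pos_right _ (by omega)
  calc n - 2 ^ (t - 1) = n - 2 ^ s * 2 ^ (t - s - 1) := by rw [h4]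
    _ ≤ n - 2 ^ s := Nat.sub_le_sub_left hAB n
    _ = k := by omega

-- the candidate works
theorem sol_k0 (n t q : Nat) (hq : q % 2 = 0) (hn : n + 1 = 2 ^ t * (q + 1)) (ht : 1 ≤ t) :
    ((n - 2 ^ (t - 1)) ||| (n - 2 ^ (t - 1) + 1)) = n := by
  have hE : 1 ≤ 2 ^ (t - 1) := Nat.one_le_two_pow
  have h2t : 2 ^ t = 2 ^ (t - 1) * 2 := by
    rw [← pow_succ]; congr 1; omega
  have hnF : n + 1 = (2 * q + 1) * 2 ^ (t - 1) + 2 ^ (t - 1) := by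
    rw [hn, h2t]; ring
  have hFE : 2 ^ (t - 1) ≤ (2 * q + 1) * 2 ^ (t - 1) :=
    Nat.le_mul_of_pos_left _ (by omega)
  have e1 : n - 2 ^ (t - 1) = (2 * q + 1) * 2 ^ (t - 1) - 1 := by omega
  have e2 : n - 2 ^ (t - 1) + 1 = (2 * q + 1) * 2 ^ (t - 1) := by omega
  rw [e2, e1]
  have hx : (2 * q + 1 + 1) * 2 ^ (t - 1) = (2 * q + 1) * 2 ^ (t - 1) + 2 ^ (t - 1) := by ring
  exact sol_of (2 * q + 1) (t - 1) n (by omega) (by omega)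

-- A-loop: runs to -1 if no k in [start, n) matches
theorem loopA_none (n : Int) : ∀ start : Int,
    (∀ j : Int, start ≤ j → j < n → PySem.Int.bor j (j + 1) ≠ n) → pvLoopA n start = -1 := by
  suffices H : ∀ fuel : Nat, ∀ start : Int, (n - start).toNat ≤ fuel →
      (∀ j : Int, start ≤ j → j < n → PySem.Int.bor j (j + 1) ≠ n) → pvLoopA n start = -1 by
    intro start h
    exact H (n - start).toNat start le_rfl h
  intro fuel
  induction fuel with
  | zero =>
    intro start hf h
    rw [pvLoopA]
    have : ¬ start < n := by omega
    simp [this]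
  | succ f ihf =>
    intro start hf h
    rw [pvLoopA]
    split_ifs with h1 h2
    · exact absurd h2 (h start le_rfl h1)
    · exact ihf (start + 1) (by omega) (fun j hj hj2 => h j (by omega) hj2)
    · rfl

-- A-loop: finds k0 if nothing before it matches
theorem loopA_found (n k0 : Int) (hk0n : k0 < n) (hhit : PySem.Int.bor k0 (k0 + 1) = n) :
    ∀ start : Int, start ≤ k0 →
    (∀ j : Int, start ≤ j → j < k0 → PySem.Int.bor j (j + 1) ≠ n) → pvLoopA n start = k0 := by
  suffices H : ∀ fuel : Nat, ∀ start : Int, (k0 - start).toNat ≤ fuel → start ≤ k0 →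
      (∀ j : Int, start ≤ j → j < k0 → PySem.Int.bor j (j + 1) ≠ n) → pvLoopA n start = k0 by
    intro start hs h
    exact H (k0 - start).toNat start le_rfl hs h
  intro fuel
  induction fuel with
  | zero =>
    intro start hf hs h
    have : start = k0 := by omega
    subst this
    rw [pvLoopA, if_pos hk0n, if_pos hhit]
  | succ f ihf =>
    intro start hf hs h
    rcases eq_or_lt_of_le hs with heq | hlt
    · subst heq
      rw [pvLoopA, if_pos hk0n, if_pos hhit]
    · rw [pvLoopA, if_pos (by omega), if_neg (h start le_rfl hlt)]
      exact ihf (start + 1) (by omega) (by omega) (fun j hj hj2 => h j (by omega) hj2)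

theorem borcast (a : Nat) :
    PySem.Int.bor (a : Int) ((a : Int) + 1) = ((a ||| (a + 1) : Nat) : Int) := by
  have h1 : ((a : Int) + 1) = ((a + 1 : Nat) : Int) := by push_cast; ring
  rw [h1, PySem.Int.bor_natCast]

-- per-element equality
theorem elem_eq (number : Int) :
    pvLoopA number 1 =
      (if number > 1 ∧ PySem.Int.mod number 2 = 1 then
        number - ((1 : Int) <<< (pvTrail number 0 - 1))
      else -1) := by
  by_cases hgt : 1 < number
  · by_cases hodd : PySem.Int.mod number 2 = 1
    · -- number odd, > 1
      have hNcast : number = (number.toNat : Int) := (Int.toNat_of_nonneg (by omega)).symm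
      set N := number.toNat with hNdef
      have hmod2 : number % 2 = 1 := by
        rw [PySem.Int.mod_eq_emod_of_pos (by omega : (0 : Int) < 2)] at hodd
        exact hodd
      have hN2 : N % 2 = 1 := by omega
      have hN3 : 3 ≤ N := by omega
      obtain ⟨q, hq, hn⟩ := natTrail_spec N
      set t := natTrail N with htdef
      have ht : 1 ≤ t := natTrail_pos N hN2
      have hE1 : 1 ≤ 2 ^ (t - 1) := Nat.one_le_two_pow
      have hpowle : 2 ^ t ≤ 2 ^ t * (q + 1) := Nat.le_mul_of_pos_right _ (by omega)
      have h2t : 2 ^ t = 2 ^ (t - 1) * 2 := by rw [← pow_succ]; congr 1; omega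
      have hk0lt : 2 ^ (t - 1) < N := by
        rcases Nat.eq_or_lt_of_le ht with h1 | h2
        · have h0 : 2 ^ (t - 1) = 1 := by rw [← h1]; norm_num
          omega
        · have h2t1 : 2 ^ (t - 1) = 2 ^ (t - 2) * 2 := by rw [← pow_succ]; congr 1; omega
          have h2t2 : 1 ≤ 2 ^ (t - 2) := Nat.one_le_two_pow
          omega
      set K : Nat := N - 2 ^ (t - 1) with hKdef
      have hK1 : 1 ≤ K := by omega
      have hhitN : (K ||| (K + 1)) = N := sol_k0 N t q hq hn ht
      have hfound : pvLoopA number 1 = (K : Int) := by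
        refine loopA_found number (K : Int) (by omega) ?_ 1 (by omega) ?_
        · rw [borcast K, hhitN, ← hNcast]
        · intro j hj1 hjK heq
          have hjcast : j = (j.toNat : Int) := (Int.toNat_of_nonneg (by omega)).symm
          rw [hjcast, borcast j.toNat] at heq
          have hJN : (j.toNat ||| (j.toNat + 1)) = N := by omega
          have hmin := sol_min N t q j.toNat hq hn ht (by omega) hJN
          omega
      rw [if_pos ⟨hgt, hodd⟩, hfound]
      have htr : pvTrail number 0 = t := by
        rw [hNcast, pvTrail_eq_natTrail N 0]
        omega
      have hsh : (1 : Int) <<< (t - 1) = 2 ^ (t - 1) := by simp [Int.shiftLeft_eq]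
      rw [htr, hsh]
      have hcastpow : ((2 ^ (t - 1) : Nat) : Int) = (2 : Int) ^ (t - 1) := by push_cast; ring
      omega
    · -- number even (or mod ≠ 1), > 1
      rw [if_neg (fun hand => hodd hand.2)]
      apply loopA_none
      intro j hj1 hjn heq
      have hmodv : number % 2 = 0 := by
        rw [PySem.Int.mod_eq_emod_of_pos (by omega : (0 : Int) < 2)] at hodd
        omega
      have hjcast : j = (j.toNat : Int) := (Int.toNat_of_nonneg (by omega)).symm
      rw [hjcast, borcast j.toNat] at heq
      have hJodd := lor_succ_odd j.toNat (by omega)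
      omega
  · -- number ≤ 1: both sides -1
    rw [if_neg (fun hand => hgt hand.1), pvLoopA, if_neg (by omega)]

-- ===== VERDICT (by name: the statement is the Claim_ definition above) =====
theorem minBitwiseArray_spec : Claim_equal_minBitwiseArray := by
  intro nums _
  unfold Spec_minBitwiseArray minBitwiseArray minBitwiseArray_alt
  rw [PySem.List.foldl_append_singleton_eq_map]
  exact List.map_congr_left (fun x _ => elem_eq x)
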